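-- pv_equiv track=rewrite | github.com/RubemMazzetto/desenvolve-python-basico | modulo-6/aula3_questao3.py | find_max_negative_interval
-- ===== SOURCE A (Python) =====
-- def find_max_negative_interval(numbers):
--     max_neg_count = 0
--     start_idx = 0
--     end_idx = 0
--     current_neg_count = 0
--     current_start = 0
--
--     for i in range(len(numbers)):
--         if numbers[i] < 0:
--             current_neg_count += 1
--         else:
--             if current_neg_count > max_neg_count:
--                 max_neg_count = current_neg_count
--                 start_idx = current_start
--                 end_idx = i
--             current_neg_count = 0
--             current_start = i + 1
--     if current_neg_count > max_neg_count:
--         start_idx = current_start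
--         end_idx = len(numbers)
--     return start_idx, end_idx
-- ===== SOURCE B (Python) =====
-- def find_max_negative_interval(numbers):
--     # Pass 1: collect the maximal runs of negatives as (start, end) pairs, exclusive end.
--     runs = []
--     run_start = None
--     for i in range(len(numbers)):
--         if numbers[i] < 0:
--             if run_start is None:
--                 run_start = i
--         else:
--             if run_start is not None:
--                 runs.append((run_start, i))
--                 run_start = None
--     if run_start is not None:
--         runs.append((run_start, len(numbers)))
--     # Pass 2: pick the first longest run (strict > keeps the earliest on ties).
--     best = (0, 0)
--     for s, e in runs:
--         if e - s > best[1] - best[0]: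
--             best = (s, e)
--     return best
-- ===== Notes on version B (the rewrite author's own statement) =====
-- stated objective: alternative
-- what changed: Replaces A's single interleaved best-so-far scan with a group-then-select decomposition: first collect all maximal negative runs as (start, end) intervals, then a separate pass picks the first longest one.
import Mathlib
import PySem

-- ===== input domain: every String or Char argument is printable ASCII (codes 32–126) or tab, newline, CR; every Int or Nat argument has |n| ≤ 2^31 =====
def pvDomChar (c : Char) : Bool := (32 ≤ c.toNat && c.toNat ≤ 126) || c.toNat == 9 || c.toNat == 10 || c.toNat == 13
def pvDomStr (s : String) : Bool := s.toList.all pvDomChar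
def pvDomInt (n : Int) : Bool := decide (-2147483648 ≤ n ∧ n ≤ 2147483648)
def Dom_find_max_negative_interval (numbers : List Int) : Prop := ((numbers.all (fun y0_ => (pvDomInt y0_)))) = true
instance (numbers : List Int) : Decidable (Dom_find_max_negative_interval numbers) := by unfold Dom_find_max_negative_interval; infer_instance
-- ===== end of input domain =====

-- B replaces A's single interleaved best-so-far scan with a group-then-select
-- decomposition (collect all maximal negative-run intervals, then pick the first
-- longest); same O(n) cost, no speed claim.

-- ===== PORT A =====
-- A's for-loop over range(len(numbers)), state (max_neg_count, start_idx, end_idx,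
-- current_neg_count, current_start); the final if after the loop is the [] case.
def goA_find_max : List Int → Int → Int → Int → Int → Int → Int → Int × Int
  | [], i, maxc, s, e, curc, curstart =>
      if curc > maxc then (curstart, i) else (s, e)
  | x :: xs, i, maxc, s, e, curc, curstart =>
      if x < 0 then
        goA_find_max xs (i + 1) maxc s e (curc + 1) curstart
      else
        if curc > maxc then
          goA_find_max xs (i + 1) curc curstart i 0 (i + 1)
        else
          goA_find_max xs (i + 1) maxc s e 0 (i + 1)

def find_max_negative_interval (numbers : List Int) : Int × Int :=
  goA_find_max numbers 0 0 0 0 0 0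

-- ===== PORT B =====
-- Pass 1 of Source B: scan with the optional current run start, emitting each
-- finished maximal negative run; the [] cases are the trailing-run flush.
def runsAux_find_max : List Int → Int → Option Int → List (Int × Int)
  | [], _, none => []
  | [], i, some s => [(s, i)]
  | x :: xs, i, none =>
      if x < 0 then runsAux_find_max xs (i + 1) (some i)
      else runsAux_find_max xs (i + 1) none
  | x :: xs, i, some s =>
      if x < 0 then runsAux_find_max xs (i + 1) (some s)
      else (s, i) :: runsAux_find_max xs (i + 1) none

-- Pass 2 of Source B: keep the first longest interval (strict >).
def selBest_find_max (runs : List (Int × Int)) (best : Int × Int) : Int × Int :=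
  runs.foldl (fun b r => if r.2 - r.1 > b.2 - b.1 then r else b) best

def find_max_negative_interval_alt (numbers : List Int) : Int × Int :=
  selBest_find_max (runsAux_find_max numbers 0 none) (0, 0)

-- ===== PRECONDITION & SPEC =====
def Spec_find_max_negative_interval (numbers : List Int) (out : Int × Int) : Prop := out = find_max_negative_interval_alt numbers
instance (numbers : List Int) (out : Int × Int) : Decidable (Spec_find_max_negative_interval numbers out) := by unfold Spec_find_max_negative_interval; infer_instance

-- ===== CLAIM (what is proved, stated in full; the proofs are below) =====
def Claim_equal_find_max_negative_interval : Prop := ∀ (numbers : List Int), Dom_find_max_negative_interval numbers → Spec_find_max_negative_interval numbers (find_max_negative_interval numbers)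

-- ===== LEMMAS AND PROOFS =====

-- Invariant linking A's state to B's remaining runs: maxc = e - s,
-- current_start = i - curc, and the pending run (if any) is open at i - curc.
lemma goA_eq_sel (l : List Int) : ∀ (i s e curc : Int), 0 ≤ curc → 0 ≤ e - s →
    goA_find_max l i (e - s) s e curc (i - curc) =
      selBest_find_max (runsAux_find_max l i
        (if curc = 0 then none else some (i - curc))) (s, e) := by
  induction l with
  | nil =>
      intro i s e curc hc he
      by_cases h0 : curc = 0
      · subst h0
        simp [goA_find_max, runsAux_find_max, selBest_find_max]
        omega
      · simp only [if_neg h0]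
        simp [goA_find_max, runsAux_find_max, selBest_find_max]
  | cons x xs ih =>
      intro i s e curc hc he
      by_cases hx : x < 0
      · -- negative: extend the current run
        have harg : i - curc = (i + 1) - (curc + 1) := by ring
        have lhs : goA_find_max (x :: xs) i (e - s) s e curc (i - curc)
            = goA_find_max xs (i + 1) (e - s) s e (curc + 1) ((i + 1) - (curc + 1)) := by
          rw [← harg]; simp [goA_find_max, hx]
        rw [lhs, ih (i + 1) s e (curc + 1) (by omega) he]
        by_cases h0 : curc = 0
        · subst h0
          simp [runsAux_find_max, hx]
        · simp only [if_neg h0, if_neg (by omega : ¬ curc + 1 = 0)]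
          rw [← harg]
          simp [runsAux_find_max, hx]
      · -- non-negative: close the current run (if any)
        by_cases h0 : curc = 0
        · subst h0
          have lhs : goA_find_max (x :: xs) i (e - s) s e 0 (i - 0)
              = goA_find_max xs (i + 1) (e - s) s e 0 ((i + 1) - 0) := by
            have hne : ¬ ((0:Int) > e - s) := by omega
            simp [goA_find_max, hx, hne]
          rw [lhs, ih (i + 1) s e 0 le_rfl he]
          simp [runsAux_find_max, hx]
        · have hpos : 0 < curc := lt_of_le_of_ne hc (Ne.symm h0)
          simp only [if_neg h0]
          have rhs : runsAux_find_max (x :: xs) i (some (i - curc))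
              = (i - curc, i) :: runsAux_find_max xs (i + 1) none := by
            simp [runsAux_find_max, hx]
          rw [rhs]
          have sel : selBest_find_max ((i - curc, i) :: runsAux_find_max xs (i + 1) none) (s, e)
              = selBest_find_max (runsAux_find_max xs (i + 1) none)
                  (if curc > e - s then (i - curc, i) else (s, e)) := by
            simp only [selBest_find_max, List.foldl_cons]
            by_cases hcmp : curc > e - s
            · rw [if_pos hcmp, if_pos (by simpa using (by omega : e - s < i - (i - curc)))]
            · rw [if_neg hcmp, if_neg (by simpa using (by omega : ¬ e - s < i - (i - curc)))]
          rw [sel]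
          by_cases hcmp : curc > e - s
          · rw [if_pos hcmp]
            have lhs : goA_find_max (x :: xs) i (e - s) s e curc (i - curc)
                = goA_find_max xs (i + 1) (i - (i - curc)) (i - curc) i 0 ((i + 1) - 0) := by
              simp [goA_find_max, hx, hcmp]
            rw [lhs, ih (i + 1) (i - curc) i 0 le_rfl (by omega)]
            simp
          · rw [if_neg hcmp]
            have lhs : goA_find_max (x :: xs) i (e - s) s e curc (i - curc)
                = goA_find_max xs (i + 1) (e - s) s e 0 ((i + 1) - 0) := by
              simp [goA_find_max, hx, hcmp]
            rw [lhs, ih (i + 1) s e 0 le_rfl he]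
            simp

-- ===== VERDICT (by name: the statement is the Claim_ definition above) =====
theorem find_max_negative_interval_spec : Claim_equal_find_max_negative_interval := by
  intro numbers _
  unfold Spec_find_max_negative_interval find_max_negative_interval find_max_negative_interval_alt
  have := goA_eq_sel numbers 0 0 0 0 le_rfl (by norm_num)
  simpa using this
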